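-- pv_equiv track=rewrite | github.com/weiyinfu/DailyAlgorithm | 二维取石子.py | solve
-- ===== SOURCE A (Python) =====
-- ma = {}
--
-- def solve(x, y):
--     # 先手必胜，返回1，否则返回-1
--     if x + y == 0:
--         return -1
--     if (x, y) in ma:
--         return ma[(x, y)]
--     mine = -1
--     for nx, ny in ((x - 1, y), (x - 2, y), (x - 3, y), (x, y - 1), (x, y - 4), (x, y - 8)):
--         if nx < 0 or ny < 0:
--             continue
--         mine = max(mine, -solve(nx, ny))
--     ma[(x, y)] = mine
--     return mine
-- ===== SOURCE B (Python) =====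
-- # Sprague-Grundy closed form: the two piles are independent subtraction games
-- # (moves {1,2,3} on x, moves {1,4,8} on y); first player wins iff the Grundy
-- # numbers differ. x's Grundy is x % 4; y's Grundy sequence is purely periodic
-- # with period 12.
-- GRUNDY_Y = (0, 1, 0, 1, 2, 0, 1, 0, 1, 2, 3, 2)
--
-- def solve(x, y):
--     if x < 0 or y < 0:
--         return -1
--     return 1 if x % 4 != GRUNDY_Y[y % 12] else -1
-- ===== Notes on version B (the rewrite author's own statement) =====
-- stated objective: faster
-- what changed: Replaced A's memoized minimax recursion over the whole (x,y) grid by the closed-form Sprague-Grundy solution: first player wins iff x % 4 differs from the period-12 Grundy table of the {1,4,8} subtraction game at y % 12.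
import Mathlib
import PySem

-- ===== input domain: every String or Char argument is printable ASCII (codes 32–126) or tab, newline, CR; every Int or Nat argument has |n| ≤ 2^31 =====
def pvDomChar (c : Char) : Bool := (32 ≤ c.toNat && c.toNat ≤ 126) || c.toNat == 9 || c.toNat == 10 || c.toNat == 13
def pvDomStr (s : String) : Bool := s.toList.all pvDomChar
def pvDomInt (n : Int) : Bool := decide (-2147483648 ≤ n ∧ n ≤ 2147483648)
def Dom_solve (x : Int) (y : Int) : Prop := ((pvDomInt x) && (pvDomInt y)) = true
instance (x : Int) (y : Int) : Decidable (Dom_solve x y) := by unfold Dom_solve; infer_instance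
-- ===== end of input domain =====

-- B replaces A's memoized minimax over the whole (x,y) grid by the closed-form
-- Sprague-Grundy solution (win iff x % 4 differs from the period-12 Grundy table
-- of the {1,4,8} subtraction game at y % 12); objective: faster.
-- A mutates the module-level memo dict `ma` (the port threads a per-call memo
-- dict instead; the cache only ever stores already-computed results, so the
-- return value is the same); the equivalence proved here is about the return
-- value only.

-- ===== PORT A =====
-- The module-level memo dict `ma` becomes a per-call Std.HashMap (Python-dict
-- get/overwrite semantics; keys are unique, so only the return value is
-- observable and it is the same); the cache only ever stores already-computed
-- results, so starting it empty per call returns the same value.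
abbrev Memo : Type := Std.HashMap (Int × Int) Int

-- A's recursion, with a fuel argument as the totality guard (each recursive call
-- strictly shrinks x + y, so the fuel solve passes is never exhausted); the
-- for-loop over the literal 6-tuple of moves is written out as its six
-- iterations in order, each threading the same state (mine, ma).
def go : Nat → Int → Int → Memo → Int × Memo
  | 0, _, _, ma => (-1, ma)
  | fuel + 1, x, y, ma =>
    if x + y = 0 then (-1, ma)
    else
      match ma[(x, y)]? with
      | some v => (v, ma)
      | none =>
        let s0 : Int × Memo := ((-1 : Int), ma)
        let s1 := if x - 1 < 0 ∨ y < 0 then s0 else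
          let t := go fuel (x - 1) y s0.2
          (max s0.1 (-t.1), t.2)
        let s2 := if x - 2 < 0 ∨ y < 0 then s1 else
          let t := go fuel (x - 2) y s1.2
          (max s1.1 (-t.1), t.2)
        let s3 := if x - 3 < 0 ∨ y < 0 then s2 else
          let t := go fuel (x - 3) y s2.2
          (max s2.1 (-t.1), t.2)
        let s4 := if x < 0 ∨ y - 1 < 0 then s3 else
          let t := go fuel x (y - 1) s3.2
          (max s3.1 (-t.1), t.2)
        let s5 := if x < 0 ∨ y - 4 < 0 then s4 else
          let t := go fuel x (y - 4) s4.2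
          (max s4.1 (-t.1), t.2)
        let s6 := if x < 0 ∨ y - 8 < 0 then s5 else
          let t := go fuel x (y - 8) s5.2
          (max s5.1 (-t.1), t.2)
        (s6.1, s6.2.insert (x, y) s6.1)

def solve (x : Int) (y : Int) : Int :=
  (go ((x + y).toNat + 1) x y Std.HashMap.emptyWithCapacity).1

-- ===== PORT B =====
def gTab : List Int := [0, 1, 0, 1, 2, 0, 1, 0, 1, 2, 3, 2]

def solve_alt (x : Int) (y : Int) : Int :=
  if x < 0 ∨ y < 0 then -1
  else if PySem.Int.mod x 4 ≠ PySem.List.pyGetD gTab (PySem.Int.mod y 12) 0 then 1 else -1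

-- ===== PRECONDITION & SPEC =====
-- Pre_ excludes exactly the nonnegative inputs with x + y > 9996, on which A's
-- depth-(x+y) recursion overflows the interpreter's recursion limit (10000 here)
-- and raises RecursionError instead of returning.
def Pre_solve (x : Int) (y : Int) : Prop := x < 0 ∨ y < 0 ∨ x + y ≤ 9996
instance (x : Int) (y : Int) : Decidable (Pre_solve x y) := by unfold Pre_solve; infer_instance

def pvWitness_solve : Int × Int := (3, 5)

def Spec_solve (x : Int) (y : Int) (out : Int) : Prop := out = solve_alt x y
instance (x : Int) (y : Int) (out : Int) : Decidable (Spec_solve x y out) := by unfold Spec_solve; infer_instance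

-- ===== CLAIM (what is proved, stated in full; the proofs are below) =====
def Claim_equal_solve : Prop := ∀ (x : Int) (y : Int), Dom_solve x y → Pre_solve x y → Spec_solve x y (solve x y)

-- ===== LEMMAS AND PROOFS =====

-- solve_alt on nonnegative arguments, in plain % arithmetic.
def gIf (r s : Int) : Int := if r ≠ PySem.List.pyGetD gTab s 0 then 1 else -1

lemma altV (a b : Int) (ha : 0 ≤ a) (hb : 0 ≤ b) :
    solve_alt a b = gIf (a % 4) (b % 12) := by
  unfold solve_alt gIf
  rw [if_neg (by omega), PySem.Int.mod_eq_emod_of_pos (by norm_num : (0:Int) < 4),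
    PySem.Int.mod_eq_emod_of_pos (by norm_num : (0:Int) < 12)]

lemma alt_neg (x y : Int) (h : x < 0 ∨ y < 0) : solve_alt x y = -1 := by
  unfold solve_alt; rw [if_pos h]

lemma alt_sum_zero (x y : Int) (h : x + y = 0) : solve_alt x y = -1 := by
  by_cases hneg : x < 0 ∨ y < 0
  · exact alt_neg x y hneg
  · have hx : x = 0 := by omega
    have hy : y = 0 := by omega
    subst hx; subst hy; decide

-- solve_alt depends on y only through y % 12 (for y, y' ≥ 0).
lemma alt_ycongr (a b b' : Int) (hb : 0 ≤ b) (hb' : 0 ≤ b') (h : b % 12 = b' % 12) :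
    solve_alt a b = solve_alt a b' := by
  by_cases ha : a < 0
  · rw [alt_neg _ _ (Or.inl ha), alt_neg _ _ (Or.inl ha)]
  · rw [altV a b (by omega) hb, altV a b' (by omega) hb', h]

-- solve_alt depends on x only through x % 4 (for x, x' ≥ 0).
lemma alt_xcongr (a a' b : Int) (ha : 0 ≤ a) (ha' : 0 ≤ a') (h : a % 4 = a' % 4) :
    solve_alt a b = solve_alt a' b := by
  by_cases hb : b < 0
  · rw [alt_neg _ _ (Or.inr hb), alt_neg _ _ (Or.inr hb)]
  · rw [altV a b ha (by omega), altV a' b ha' (by omega), h]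

-- A's move loop with the recursive results replaced by solve_alt values.
def altFold (l : List (Int × Int)) (m : Int) : Int :=
  l.foldl (fun m p => if p.1 < 0 ∨ p.2 < 0 then m else max m (-(solve_alt p.1 p.2))) m

def stepAlt (x y : Int) : Int :=
  altFold [(x - 1, y), (x - 2, y), (x - 3, y), (x, y - 1), (x, y - 4), (x, y - 8)] (-1)

-- stepAlt is invariant under reducing x mod 4 (keeping the x<4 regime) and
-- y mod 12 (keeping the y<12 regime).
lemma stepAlt_congr (x x' y y' : Int) (hx : 0 ≤ x) (hx' : 0 ≤ x') (hy : 0 ≤ y) (hy' : 0 ≤ y')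
    (hx4 : x % 4 = x' % 4) (hxlt : x < 4 ↔ x' < 4)
    (hy12 : y % 12 = y' % 12) (hylt : y < 12 ↔ y' < 12) :
    stepAlt x y = stepAlt x' y' := by
  by_cases hxs : x < 4
  · have hxx : x = x' := by omega
    subst hxx
    by_cases hys : y < 12
    · have hyy : y = y' := by omega
      subst hyy; rfl
    · have e1 : solve_alt (x - 1) y = solve_alt (x - 1) y' := alt_ycongr _ _ _ (by omega) (by omega) (by omega)
      have e2 : solve_alt (x - 2) y = solve_alt (x - 2) y' := alt_ycongr _ _ _ (by omega) (by omega) (by omega)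
      have e3 : solve_alt (x - 3) y = solve_alt (x - 3) y' := alt_ycongr _ _ _ (by omega) (by omega) (by omega)
      have e4 : solve_alt x (y - 1) = solve_alt x (y' - 1) := alt_ycongr _ _ _ (by omega) (by omega) (by omega)
      have e5 : solve_alt x (y - 4) = solve_alt x (y' - 4) := alt_ycongr _ _ _ (by omega) (by omega) (by omega)
      have e6 : solve_alt x (y - 8) = solve_alt x (y' - 8) := alt_ycongr _ _ _ (by omega) (by omega) (by omega)
      simp only [stepAlt, altFold, List.foldl_cons, List.foldl_nil, e1, e2, e3, e4, e5, e6,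
        show ¬ (y < 0) from by omega, show ¬ (y' < 0) from by omega,
        show ¬ (y - 1 < 0) from by omega, show ¬ (y' - 1 < 0) from by omega,
        show ¬ (y - 4 < 0) from by omega, show ¬ (y' - 4 < 0) from by omega,
        show ¬ (y - 8 < 0) from by omega, show ¬ (y' - 8 < 0) from by omega,
        or_false]
  · have hxs' : ¬ x' < 4 := by omega
    by_cases hys : y < 12
    · have hyy : y = y' := by omega
      subst hyy
      have e1 : solve_alt (x - 1) y = solve_alt (x' - 1) y := alt_xcongr _ _ _ (by omega) (by omega) (by omega)
      have e2 : solve_alt (x - 2) y = solve_alt (x' - 2) y := alt_xcongr _ _ _ (by omega) (by omega) (by omega)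
      have e3 : solve_alt (x - 3) y = solve_alt (x' - 3) y := alt_xcongr _ _ _ (by omega) (by omega) (by omega)
      have e4 : solve_alt x (y - 1) = solve_alt x' (y - 1) := alt_xcongr _ _ _ (by omega) (by omega) (by omega)
      have e5 : solve_alt x (y - 4) = solve_alt x' (y - 4) := alt_xcongr _ _ _ (by omega) (by omega) (by omega)
      have e6 : solve_alt x (y - 8) = solve_alt x' (y - 8) := alt_xcongr _ _ _ (by omega) (by omega) (by omega)
      simp only [stepAlt, altFold, List.foldl_cons, List.foldl_nil, e1, e2, e3, e4, e5, e6,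
        show ¬ (x - 1 < 0) from by omega, show ¬ (x' - 1 < 0) from by omega,
        show ¬ (x - 2 < 0) from by omega, show ¬ (x' - 2 < 0) from by omega,
        show ¬ (x - 3 < 0) from by omega, show ¬ (x' - 3 < 0) from by omega,
        show ¬ (x < 0) from by omega, show ¬ (x' < 0) from by omega,
        false_or]
    · have e1 : solve_alt (x - 1) y = solve_alt (x' - 1) y' :=
        (alt_xcongr (x - 1) (x' - 1) y (by omega) (by omega) (by omega)).trans
          (alt_ycongr (x' - 1) y y' (by omega) (by omega) (by omega))
      have e2 : solve_alt (x - 2) y = solve_alt (x' - 2) y' :=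
        (alt_xcongr (x - 2) (x' - 2) y (by omega) (by omega) (by omega)).trans
          (alt_ycongr (x' - 2) y y' (by omega) (by omega) (by omega))
      have e3 : solve_alt (x - 3) y = solve_alt (x' - 3) y' :=
        (alt_xcongr (x - 3) (x' - 3) y (by omega) (by omega) (by omega)).trans
          (alt_ycongr (x' - 3) y y' (by omega) (by omega) (by omega))
      have e4 : solve_alt x (y - 1) = solve_alt x' (y' - 1) :=
        (alt_xcongr x x' (y - 1) (by omega) (by omega) (by omega)).trans
          (alt_ycongr x' (y - 1) (y' - 1) (by omega) (by omega) (by omega))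
      have e5 : solve_alt x (y - 4) = solve_alt x' (y' - 4) :=
        (alt_xcongr x x' (y - 4) (by omega) (by omega) (by omega)).trans
          (alt_ycongr x' (y - 4) (y' - 4) (by omega) (by omega) (by omega))
      have e6 : solve_alt x (y - 8) = solve_alt x' (y' - 8) :=
        (alt_xcongr x x' (y - 8) (by omega) (by omega) (by omega)).trans
          (alt_ycongr x' (y - 8) (y' - 8) (by omega) (by omega) (by omega))
      simp only [stepAlt, altFold, List.foldl_cons, List.foldl_nil, e1, e2, e3, e4, e5, e6,
        show ¬ (x - 1 < 0) from by omega, show ¬ (x' - 1 < 0) from by omega,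
        show ¬ (x - 2 < 0) from by omega, show ¬ (x' - 2 < 0) from by omega,
        show ¬ (x - 3 < 0) from by omega, show ¬ (x' - 3 < 0) from by omega,
        show ¬ (x < 0) from by omega, show ¬ (x' < 0) from by omega,
        show ¬ (y < 0) from by omega, show ¬ (y' < 0) from by omega,
        show ¬ (y - 1 < 0) from by omega, show ¬ (y' - 1 < 0) from by omega,
        show ¬ (y - 4 < 0) from by omega, show ¬ (y' - 4 < 0) from by omega,
        show ¬ (y - 8 < 0) from by omega, show ¬ (y' - 8 < 0) from by omega]

-- One-step Grundy check on the finite fundamental domain [0,8) × [0,24).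
lemma keyFin : ∀ a : Nat, a < 8 → ∀ b : Nat, b < 24 → 0 < a + b →
    stepAlt (a : Int) (b : Int) = solve_alt (a : Int) (b : Int) := by decide

-- One-step Grundy check for all nonnegative x, y with x + y > 0.
lemma key (x y : Int) (hx : 0 ≤ x) (hy : 0 ≤ y) (hpos : 0 < x + y) :
    stepAlt x y = solve_alt x y := by
  have hstep : stepAlt x y = stepAlt (if x < 4 then x else x % 4 + 4) (if y < 12 then y else y % 12 + 12) :=
    stepAlt_congr _ _ _ _ hx (by split <;> omega) hy (by split <;> omega)
      (by split <;> omega) (by split <;> omega) (by split <;> omega) (by split <;> omega)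
  have halt : solve_alt x y = solve_alt (if x < 4 then x else x % 4 + 4) (if y < 12 then y else y % 12 + 12) :=
    (alt_xcongr x _ y hx (by split <;> omega) (by split <;> omega)).trans
      (alt_ycongr _ y _ hy (by split <;> omega) (by split <;> omega))
  rw [hstep, halt]
  have h1 : (if x < 4 then x else x % 4 + 4) = ((if x < 4 then x else x % 4 + 4).toNat : Int) := by
    split <;> omega
  have h2 : (if y < 12 then y else y % 12 + 12) = ((if y < 12 then y else y % 12 + 12).toNat : Int) := by
    split <;> omega
  rw [h1, h2]
  exact keyFin _ (by split <;> omega) _ (by split <;> omega) (by split <;> omega)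

lemma stepAlt_neg (x y : Int) (h : x < 0 ∨ y < 0) : stepAlt x y = -1 := by
  rcases h with h | h
  · simp only [stepAlt, altFold, List.foldl_cons, List.foldl_nil,
      show (x - 1 < 0 ∨ y < 0) from Or.inl (by omega),
      show (x - 2 < 0 ∨ y < 0) from Or.inl (by omega),
      show (x - 3 < 0 ∨ y < 0) from Or.inl (by omega),
      show (x < 0 ∨ y - 1 < 0) from Or.inl h,
      show (x < 0 ∨ y - 4 < 0) from Or.inl h,
      show (x < 0 ∨ y - 8 < 0) from Or.inl h, if_true]
  · simp only [stepAlt, altFold, List.foldl_cons, List.foldl_nil,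
      show (x - 1 < 0 ∨ y < 0) from Or.inr h,
      show (x - 2 < 0 ∨ y < 0) from Or.inr h,
      show (x - 3 < 0 ∨ y < 0) from Or.inr h,
      show (x < 0 ∨ y - 1 < 0) from Or.inr (by omega),
      show (x < 0 ∨ y - 4 < 0) from Or.inr (by omega),
      show (x < 0 ∨ y - 8 < 0) from Or.inr (by omega), if_true]

lemma key' (x y : Int) (h0 : x + y ≠ 0) : stepAlt x y = solve_alt x y := by
  by_cases hneg : x < 0 ∨ y < 0
  · rw [stepAlt_neg x y hneg, alt_neg x y hneg]
  · exact key x y (by omega) (by omega) (by omega)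

-- One iteration of A's move loop: the state update and its value in terms of
-- solve_alt, given the induction hypothesis for the one possible child call.
def stepA (fuel : Nat) (nx ny : Int) (acc : Int × Memo) : Int × Memo :=
  if nx < 0 ∨ ny < 0 then acc
  else
    let t := go fuel nx ny acc.2
    (max acc.1 (-t.1), t.2)

-- The memo invariant: every cached value is the Grundy value of its key.
def MemoInv (d : Memo) : Prop :=
  ∀ a b v, d[(a, b)]? = some v → v = solve_alt a b

lemma memoInv_empty : MemoInv (Std.HashMap.emptyWithCapacity : Memo) := by
  intro a b v h
  simp at h

lemma memoInv_insert (d : Memo) (hd : MemoInv d) (x y v : Int) (hv : v = solve_alt x y) :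
    MemoInv (d.insert (x, y) v) := by
  intro a b w hw
  rw [Std.HashMap.getElem?_insert] at hw
  by_cases hk : ((x, y) : Int × Int) = (a, b)
  · obtain ⟨rfl, rfl⟩ := Prod.mk.injEq .. ▸ hk
    simp at hw
    rw [← hw]; exact hv
  · have hb : (((x, y) : Int × Int) == (a, b)) = false := by
      simpa using hk
    rw [hb] at hw
    simp at hw
    exact hd a b w hw

lemma stepOne (fuel : Nat) (nx ny : Int) (acc : Int × Memo)
    (hrec : ¬ (nx < 0 ∨ ny < 0) →
      (go fuel nx ny acc.2).1 = solve_alt nx ny ∧ MemoInv (go fuel nx ny acc.2).2)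
    (hInv : MemoInv acc.2) :
    (stepA fuel nx ny acc).1
        = (if nx < 0 ∨ ny < 0 then acc.1 else max acc.1 (-(solve_alt nx ny)))
      ∧ MemoInv (stepA fuel nx ny acc).2 := by
  by_cases g : nx < 0 ∨ ny < 0
  · constructor
    · simp only [stepA, if_pos g]
    · simp only [stepA, if_pos g]; exact hInv
  · obtain ⟨h1, h2⟩ := hrec g
    constructor
    · simp only [stepA, if_neg g, h1]
    · simp only [stepA, if_neg g]; exact h2

-- go (fuel+1) on a memo miss, written with the stepA iteration helper
-- (definitionally the same expression).
lemma go_unfold (fuel : Nat) (x y : Int) (ma : Memo)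
    (h0 : ¬ x + y = 0) (hget : ma[(x, y)]? = none) :
    go (fuel + 1) x y ma =
      ((stepA fuel x (y - 8)
        (stepA fuel x (y - 4)
          (stepA fuel x (y - 1)
            (stepA fuel (x - 3) y
              (stepA fuel (x - 2) y
                (stepA fuel (x - 1) y ((-1 : Int), ma))))))).1,
       (stepA fuel x (y - 8)
        (stepA fuel x (y - 4)
          (stepA fuel x (y - 1)
            (stepA fuel (x - 3) y
              (stepA fuel (x - 2) y
                (stepA fuel (x - 1) y ((-1 : Int), ma))))))).2.insert (x, y)
       (stepA fuel x (y - 8)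
        (stepA fuel x (y - 4)
          (stepA fuel x (y - 1)
            (stepA fuel (x - 3) y
              (stepA fuel (x - 2) y
                (stepA fuel (x - 1) y ((-1 : Int), ma))))))).1) := by
  rw [go, if_neg h0]
  rw [hget]
  rfl

lemma go_correct : ∀ (fuel : Nat) (x y : Int) (ma : Memo), (x + y).toNat < fuel → MemoInv ma →
    (go fuel x y ma).1 = solve_alt x y ∧ MemoInv (go fuel x y ma).2 := by
  intro fuel
  induction fuel with
  | zero => intro x y ma hn; omega
  | succ fuel ih =>
    intro x y ma hn hInv
    by_cases h0 : x + y = 0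
    · rw [go, if_pos h0]
      exact ⟨(alt_sum_zero x y h0).symm, hInv⟩
    · cases hget : ma[(x, y)]? with
      | some v =>
        rw [go, if_neg h0, hget]
        exact ⟨hInv x y v hget, hInv⟩
      | none =>
        rw [go_unfold fuel x y ma h0 hget]
        have hr : ∀ (nx ny : Int) (d : Memo), MemoInv d → ¬ (nx < 0 ∨ ny < 0) →
            nx + ny < x + y →
            (go fuel nx ny d).1 = solve_alt nx ny ∧ MemoInv (go fuel nx ny d).2 := by
          intro nx ny d hd hg hlt
          exact ih nx ny d (by omega) hd
        obtain ⟨e1, i1⟩ := stepOne fuel (x - 1) y ((-1 : Int), ma)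
          (fun g => hr (x - 1) y ma hInv g (by omega)) hInv
        obtain ⟨e2, i2⟩ := stepOne fuel (x - 2) y _
          (fun g => hr (x - 2) y _ i1 g (by omega)) i1
        obtain ⟨e3, i3⟩ := stepOne fuel (x - 3) y _
          (fun g => hr (x - 3) y _ i2 g (by omega)) i2
        obtain ⟨e4, i4⟩ := stepOne fuel x (y - 1) _
          (fun g => hr x (y - 1) _ i3 g (by omega)) i3
        obtain ⟨e5, i5⟩ := stepOne fuel x (y - 4) _
          (fun g => hr x (y - 4) _ i4 g (by omega)) i4
        obtain ⟨e6, i6⟩ := stepOne fuel x (y - 8) _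
          (fun g => hr x (y - 8) _ i5 g (by omega)) i5
        have hv : (stepA fuel x (y - 8)
            (stepA fuel x (y - 4)
              (stepA fuel x (y - 1)
                (stepA fuel (x - 3) y
                  (stepA fuel (x - 2) y
                    (stepA fuel (x - 1) y ((-1 : Int), ma))))))).1 = solve_alt x y := by
          rw [e6, e5, e4, e3, e2, e1]
          rw [← key' x y h0]
          simp only [stepAlt, altFold, List.foldl_cons, List.foldl_nil]
        exact ⟨hv, memoInv_insert _ i6 x y _ hv⟩

-- ===== VERDICT (by name: the statement is the Claim_ definition above) =====
theorem solve_spec : Claim_equal_solve := by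
  unfold Claim_equal_solve Spec_solve
  intro x y _ _
  exact (go_correct ((x + y).toNat + 1) x y Std.HashMap.emptyWithCapacity
    (Nat.lt_succ_self _) memoInv_empty).1
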